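-- pv_equiv track=rewrite | github.com/carlosaln/task-popper | task_popper/config.py | parse_preferred_days
-- ===== SOURCE A (Python) =====
-- _DAY_NAMES = {
--     "mon": 0, "monday": 0,
--     "tue": 1, "tuesday": 1,
--     "wed": 2, "wednesday": 2,
--     "thu": 3, "thursday": 3,
--     "fri": 4, "friday": 4,
--     "sat": 5, "saturday": 5,
--     "sun": 6, "sunday": 6,
-- }
--
-- def parse_preferred_days(text: str) -> list[int]:
--     """Parse a day spec string into a sorted list of weekday ints (0=Mon…6=Sun).
--
--     Accepts: "weekdays", "weekends", "all", blank, or comma-separated day names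
--     e.g. "mon,wed,fri" or "sat,sun".
--     """
--     t = text.strip().lower()
--     if not t or t == "all":
--         return []
--     if t == "weekdays":
--         return [0, 1, 2, 3, 4]
--     if t == "weekends":
--         return [5, 6]
--     days: list[int] = []
--     for part in t.split(","):
--         part = part.strip()
--         if part in _DAY_NAMES:
--             d = _DAY_NAMES[part]
--             if d not in days:
--                 days.append(d)
--     return sorted(days)
-- ===== SOURCE B (Python) =====
-- _DAY_SPECS = [
--     (0, "mon", "monday"),
--     (1, "tue", "tuesday"),
--     (2, "wed", "wednesday"),
--     (3, "thu", "thursday"),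
--     (4, "fri", "friday"),
--     (5, "sat", "saturday"),
--     (6, "sun", "sunday"),
-- ]
--
--
-- def parse_preferred_days(text: str) -> list[int]:
--     t = text.strip().lower()
--     if not t or t == "all":
--         return []
--     if t == "weekdays":
--         return [0, 1, 2, 3, 4]
--     if t == "weekends":
--         return [5, 6]
--     tokens = {p.strip() for p in t.split(",")}
--     return [d for (d, short, full) in _DAY_SPECS if short in tokens or full in tokens]
-- ===== Notes on version B (the rewrite author's own statement) =====
-- stated objective: alternative
-- what changed: B inverts the traversal: instead of A's token-driven loop that maps each token through the name dict, dedups by membership and finally sorts, B builds the set of stripped tokens once and then scans the fixed table of seven (day, short-name, long-name) records in weekday order, emitting each day whose name occurs in the token set; the dict, the dedup append and the sort all disappear.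
import Mathlib
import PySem

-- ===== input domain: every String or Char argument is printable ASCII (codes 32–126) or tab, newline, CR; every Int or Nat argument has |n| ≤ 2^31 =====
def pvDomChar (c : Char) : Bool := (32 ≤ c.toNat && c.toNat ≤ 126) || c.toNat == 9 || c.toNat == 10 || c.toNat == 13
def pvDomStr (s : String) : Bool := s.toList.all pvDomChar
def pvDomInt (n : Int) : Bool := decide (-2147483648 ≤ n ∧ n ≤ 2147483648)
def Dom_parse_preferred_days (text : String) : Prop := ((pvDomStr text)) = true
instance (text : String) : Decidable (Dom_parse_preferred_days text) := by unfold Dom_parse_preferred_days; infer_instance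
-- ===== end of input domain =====

-- B inverts A's traversal: a token set built once, then a scan of the fixed seven-day
-- table in weekday order — no name dict, no membership-dedup append, no final sort (objective: alternative).

-- ===== PORT A =====
-- shared module constant _DAY_NAMES (a dict literal with distinct keys)
def dayList : List (String × Int) := [
  ("mon", 0), ("monday", 0),
  ("tue", 1), ("tuesday", 1),
  ("wed", 2), ("wednesday", 2),
  ("thu", 3), ("thursday", 3),
  ("fri", 4), ("friday", 4),
  ("sat", 5), ("saturday", 5),
  ("sun", 6), ("sunday", 6)]

def dayNames : PySem.Dict String Int := PySem.Dict.mk dayList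

def parse_preferred_days (text : String) : List Int :=
  let t := PySem.Str.lower (PySem.Str.strip text)
  if t = "" ∨ t = "all" then []
  else if t = "weekdays" then [0, 1, 2, 3, 4]
  else if t = "weekends" then [5, 6]
  else
    -- t.split(","): the separator is the literal non-empty ",", so split? is always `some`
    let days := ((PySem.Str.split? t ",").getD []).foldl (fun days part =>
      let part := PySem.Str.strip part
      match PySem.Dict.get? dayNames part with
      | some d => if d ∈ days then days else days ++ [d]
      | none => days) []
    PySem.List.sorted days (fun x => x) false

-- ===== PORT B =====
-- B's module constant _DAY_SPECS: the seven weekdays, each with its two accepted names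
def daySpecs : List (Int × String × String) := [
  (0, "mon", "monday"),
  (1, "tue", "tuesday"),
  (2, "wed", "wednesday"),
  (3, "thu", "thursday"),
  (4, "fri", "friday"),
  (5, "sat", "saturday"),
  (6, "sun", "sunday")]

def parse_preferred_days_alt (text : String) : List Int :=
  let t := PySem.Str.lower (PySem.Str.strip text)
  if t = "" ∨ t = "all" then []
  else if t = "weekdays" then [0, 1, 2, 3, 4]
  else if t = "weekends" then [5, 6]
  else
    -- {p.strip() for p in t.split(",")} — a set used only for membership afterwards
    let tokens : PySem.Set String :=
      PySem.Set.ofList (((PySem.Str.split? t ",").getD []).map PySem.Str.strip)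
    (daySpecs.filter (fun x =>
      PySem.Set.contains tokens x.2.1 || PySem.Set.contains tokens x.2.2)).map (fun x => x.1)

-- ===== PRECONDITION & SPEC =====
def Spec_parse_preferred_days (text : String) (out : List Int) : Prop := out = parse_preferred_days_alt text
instance (text : String) (out : List Int) : Decidable (Spec_parse_preferred_days text out) := by unfold Spec_parse_preferred_days; infer_instance

-- ===== CLAIM (what is proved, stated in full; the proofs are below) =====
def Claim_equal_parse_preferred_days : Prop := ∀ (text : String), Dom_parse_preferred_days text → Spec_parse_preferred_days text (parse_preferred_days text)

-- ===== LEMMAS AND PROOFS =====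

-- abbreviation for A's loop body
def stepA (days : List Int) (part : String) : List Int :=
  match PySem.Dict.get? dayNames (PySem.Str.strip part) with
  | some d => if d ∈ days then days else days ++ [d]
  | none => days

-- membership in A's accumulated list: exactly the days some token maps to
theorem mem_foldA (parts : List String) (acc : List Int) (x : Int) :
    x ∈ parts.foldl stepA acc ↔
      x ∈ acc ∨ ∃ p ∈ parts, PySem.Dict.get? dayNames (PySem.Str.strip p) = some x := by
  induction parts generalizing acc with
  | nil => simp
  | cons p ps ih =>
    simp only [List.foldl_cons, ih, List.mem_cons, exists_eq_or_imp]
    unfold stepA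
    cases h : PySem.Dict.get? dayNames (PySem.Str.strip p) with
    | none => simp
    | some d =>
      by_cases hm : d ∈ acc
      · simp only [hm, if_pos, Option.some.injEq]
        constructor
        · rintro (hx | hx); exact Or.inl hx; exact Or.inr (Or.inr hx)
        · rintro (hx | hx | hx)
          · exact Or.inl hx
          · exact Or.inl (hx ▸ hm)
          · exact Or.inr hx
      · simp only [hm, if_neg, not_false_iff, List.mem_append, List.mem_singleton,
          Option.some.injEq]
        constructor
        · rintro ((hx | hx) | hx)
          · exact Or.inl hx
          · exact Or.inr (Or.inl hx.symm)
          · exact Or.inr (Or.inr hx)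
        · rintro (hx | hx | hx)
          · exact Or.inl (Or.inl hx)
          · exact Or.inl (Or.inr hx.symm)
          · exact Or.inr hx

-- with nodup keys, a dict lookup succeeding is exactly membership of the pair
theorem get?_mk_eq_some_iff {κ ν : Type} [BEq κ] [LawfulBEq κ] (l : List (κ × ν))
    (hnd : (l.map Prod.fst).Nodup) (k : κ) (v : ν) :
    (PySem.Dict.mk l).get? k = some v ↔ (k, v) ∈ l := by
  induction l with
  | nil => simp [PySem.Dict.get?]
  | cons a rest ih =>
    rw [show PySem.Dict.mk (a :: rest) = PySem.Dict.mk ((a.1, a.2) :: rest) from rfl,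
        PySem.Dict.get?_mk_cons]
    simp only [List.map_cons, List.nodup_cons] at hnd
    by_cases hk : a.1 = k
    · subst hk
      simp only [beq_self_eq_true, if_pos, Option.some.injEq, List.mem_cons]
      constructor
      · intro h; exact Or.inl (by rw [← h])
      · rintro (h | h)
        · exact (congrArg Prod.snd h).symm
        · exact absurd (List.mem_map_of_mem (f := Prod.fst) h) hnd.1
    · have : (a.1 == k) = false := by simp [hk]
      simp only [this, Bool.false_eq_true, if_neg, not_false_iff, ih hnd.2, List.mem_cons]
      constructor
      · exact Or.inr
      · rintro (h | h)
        · exact absurd (congrArg Prod.fst h).symm hk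
        · exact h

-- A's accumulator stays nodup with all elements weekday indices 0..6
theorem fold_inv (parts : List String) (acc : List Int)
    (hnd : acc.Nodup) (hb : ∀ d ∈ acc, d ∈ ([0, 1, 2, 3, 4, 5, 6] : List Int)) :
    (parts.foldl stepA acc).Nodup ∧
    (∀ d ∈ parts.foldl stepA acc, d ∈ ([0, 1, 2, 3, 4, 5, 6] : List Int)) := by
  induction parts generalizing acc with
  | nil => exact ⟨hnd, hb⟩
  | cons p ps ih =>
    simp only [List.foldl_cons]
    unfold stepA
    cases h : PySem.Dict.get? dayNames (PySem.Str.strip p) with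
    | none => exact ih acc hnd hb
    | some d =>
      by_cases hm : d ∈ acc
      · simp only [hm, if_pos]
        exact ih acc hnd hb
      · simp only [hm, if_neg, not_false_iff]
        refine ih (acc ++ [d]) ?_ ?_
        · rw [List.nodup_append]
          refine ⟨hnd, List.nodup_singleton d, ?_⟩
          intro a ha b hb2 he
          rw [List.mem_singleton] at hb2
          exact hm (hb2 ▸ he ▸ ha)
        · intro x hx
          rcases List.mem_append.1 hx with hx | hx
          · exact hb x hx
          · simp only [List.mem_singleton] at hx
            subst hx
            have := (get?_mk_eq_some_iff dayList (by decide) _ _).1 h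
            revert this
            unfold dayList
            intro this
            simp only [List.mem_cons, List.not_mem_nil, or_false, Prod.mk.injEq] at this
            rcases this with ⟨_, h⟩|⟨_, h⟩|⟨_, h⟩|⟨_, h⟩|⟨_, h⟩|⟨_, h⟩|⟨_, h⟩|⟨_, h⟩|⟨_, h⟩|⟨_, h⟩|⟨_, h⟩|⟨_, h⟩|⟨_, h⟩|⟨_, h⟩ <;> simp [← h]

-- a nodup list of weekday indices: sorting it = scanning 0..6 for membership
theorem sorted_eq_filter (days : List Int) (hnd : days.Nodup)
    (hb : ∀ d ∈ days, d ∈ ([0, 1, 2, 3, 4, 5, 6] : List Int)) :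
    PySem.List.sorted days (fun x => x) false
      = ([0, 1, 2, 3, 4, 5, 6] : List Int).filter (fun d => d ∈ days) := by
  apply PySem.List.sorted_eq_of_perm_of_pairwise_lt
  · rw [List.perm_ext_iff_of_nodup (List.Nodup.filter _ (by decide)) hnd]
    intro a
    simp only [List.mem_filter, decide_eq_true_eq]
    exact ⟨fun h => h.2, fun h => ⟨hb a h, h⟩⟩
  · exact List.Pairwise.filter _ (by decide)

-- filtering a record table then projecting = projecting then filtering, when the
-- predicates agree on the table
theorem filter_map_fst (L : List (Int × String × String)) (q : Int × String × String → Bool)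
    (p : Int → Bool) (h : ∀ x ∈ L, q x = p x.1) :
    (L.filter q).map (fun x => x.1) = (L.map (fun x => x.1)).filter p := by
  induction L with
  | nil => rfl
  | cons a l ih =>
    simp only [List.filter_cons, List.map_cons, h a (List.mem_cons_self)]
    split <;> simp [ih (fun x hx => h x (List.mem_cons_of_mem a hx))]

-- ===== VERDICT (by name: the statement is the Claim_ definition above) =====
theorem parse_preferred_days_spec : Claim_equal_parse_preferred_days := by
  intro text _
  unfold Spec_parse_preferred_days parse_preferred_days parse_preferred_days_alt
  dsimp only
  split_ifs with h1 h2 h3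
  · rfl
  · rfl
  · rfl
  · set parts := (PySem.Str.split? (PySem.Str.lower (PySem.Str.strip text)) ",").getD [] with hparts
    have hfold : (parts.foldl (fun days part =>
        match PySem.Dict.get? dayNames (PySem.Str.strip part) with
        | some d => if d ∈ days then days else days ++ [d]
        | none => days) []) = parts.foldl stepA [] := rfl
    rw [hfold]
    obtain ⟨hnd, hb⟩ := fold_inv parts [] (by simp) (by simp)
    rw [sorted_eq_filter _ hnd hb]
    rw [filter_map_fst daySpecs _ (fun d => decide (d ∈ parts.foldl stepA [])) ?_]
    · rfl
    · intro x hx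
      have hmem : ∀ d : Int, (d ∈ parts.foldl stepA []) ↔
          ∃ p ∈ parts, PySem.Dict.get? dayNames (PySem.Str.strip p) = some d := by
        intro d
        rw [mem_foldA]
        simp
      have htok : ∀ s : String, PySem.Set.contains
          (PySem.Set.ofList (parts.map PySem.Str.strip)) s = true ↔
          ∃ p ∈ parts, PySem.Str.strip p = s := by
        intro s
        rw [show (PySem.Set.contains (PySem.Set.ofList (parts.map PySem.Str.strip)) s = true) ↔
            s ∈ PySem.Set.ofList (parts.map PySem.Str.strip) from by
          simp [PySem.Set.contains]]
        rw [PySem.Set.mem_ofList]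
        simp
      have hlook : ∀ (s : String) (d : Int),
          PySem.Dict.get? dayNames s = some d ↔ (s, d) ∈ dayList :=
        fun s d => get?_mk_eq_some_iff dayList (by decide) s d
      -- case over the seven table rows
      have h7 : x = (0, "mon", "monday") ∨ x = (1, "tue", "tuesday") ∨ x = (2, "wed", "wednesday")
          ∨ x = (3, "thu", "thursday") ∨ x = (4, "fri", "friday") ∨ x = (5, "sat", "saturday")
          ∨ x = (6, "sun", "sunday") := by
        revert hx; unfold daySpecs; intro hx
        simpa using hx
      have key : ∀ d : Int, ∀ n1 n2 : String,
          (∀ s : String, (s, d) ∈ dayList ↔ s = n1 ∨ s = n2) →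
          (PySem.Set.contains (PySem.Set.ofList (parts.map PySem.Str.strip)) n1 ||
           PySem.Set.contains (PySem.Set.ofList (parts.map PySem.Str.strip)) n2)
            = decide (d ∈ parts.foldl stepA []) := by
        intro d n1 n2 hch
        rcases Bool.eq_false_or_eq_true (decide (d ∈ parts.foldl stepA [])) with hd | hd <;> rw [hd]
        case inl =>
          have hin : d ∈ parts.foldl stepA [] := of_decide_eq_true hd
          obtain ⟨p, hp, hpd⟩ := (hmem d).1 hin
          rw [hlook, hch] at hpd
          rcases hpd with hpd | hpd
          · have : PySem.Set.contains (PySem.Set.ofList (parts.map PySem.Str.strip)) n1 = true :=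
              (htok n1).2 ⟨p, hp, hpd⟩
            rw [this]; rfl
          · have : PySem.Set.contains (PySem.Set.ofList (parts.map PySem.Str.strip)) n2 = true :=
              (htok n2).2 ⟨p, hp, hpd⟩
            rw [this]; simp
        case inr =>
          have hnot : ¬ d ∈ parts.foldl stepA [] := of_decide_eq_false hd
          rw [hmem] at hnot
          push Not at hnot
          have h1 : PySem.Set.contains (PySem.Set.ofList (parts.map PySem.Str.strip)) n1 = false := by
            rw [Bool.eq_false_iff]; intro hc
            obtain ⟨p, hp, hs⟩ := (htok n1).1 hc
            exact hnot p hp (by rw [hs, hlook, hch]; exact Or.inl rfl)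
          have h2 : PySem.Set.contains (PySem.Set.ofList (parts.map PySem.Str.strip)) n2 = false := by
            rw [Bool.eq_false_iff]; intro hc
            obtain ⟨p, hp, hs⟩ := (htok n2).1 hc
            exact hnot p hp (by rw [hs, hlook, hch]; exact Or.inr rfl)
          rw [h1, h2]; rfl
      rcases h7 with hx7 | hx7 | hx7 | hx7 | hx7 | hx7 | hx7 <;> subst hx7 <;>
        exact key _ _ _ (by intro s; simp [dayList])
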